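-- pv_equiv track=rewrite | github.com/PabloMarcialSeguritech/cassia-api | infraestructure/cassia/cassia_automation_actions.py | get_status_windows
-- ===== SOURCE A (Python) =====
-- def get_status_windows(cadena):
--     lineas = cadena.splitlines()
--     result = ""
--     for linea in lineas:
--         if "STATE" in linea:
--             if "RUNNING" in linea:
--                 result = "Servicio activo (El servicio está en ejecución)"
--             if "STOPPED" in linea:
--                 result = "Servicio inactivo (El servicio no está en ejecución)"
--             if "PAUSED" in linea:
--                 result = "El servicio está pausado."
--             if "START_PENDING" in linea:
--                 result = "El servicio está en proceso de inicio"
--             if "STOP_PENDING" in linea: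
--                 result = "El servicio está en proceso de detención"
--             if "CONTINUE_PENDING" in linea:
--                 result = "El servicio está en proceso de reanudación después de estar pausado."
--             if "PAUSE_PENDING" in linea:
--                 result = "El servicio está en proceso de pausa."
--     return result
-- ===== SOURCE B (Python) =====
-- _KEYWORDS = [
--     ("RUNNING", "Servicio activo (El servicio está en ejecución)"),
--     ("STOPPED", "Servicio inactivo (El servicio no está en ejecución)"),
--     ("PAUSED", "El servicio está pausado."),
--     ("START_PENDING", "El servicio está en proceso de inicio"),
--     ("STOP_PENDING", "El servicio está en proceso de detención"),
--     ("CONTINUE_PENDING", "El servicio está en proceso de reanudación después de estar pausado."),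
--     ("PAUSE_PENDING", "El servicio está en proceso de pausa."),
-- ]
--
--
-- def _line_message(linea):
--     msg = ""
--     for kw, texto in _KEYWORDS:
--         if kw in linea:
--             msg = texto
--     return msg
--
--
-- def get_status_windows(cadena):
--     for linea in reversed(cadena.splitlines()):
--         if "STATE" not in linea:
--             continue
--         msg = _line_message(linea)
--         if msg:
--             return msg
--     return ""
-- ===== Notes on version B (the rewrite author's own statement) =====
-- stated objective: alternative
-- what changed: B scans the lines in reverse and returns immediately from the last line that contains STATE and a keyword (keywords in a data table with a small fold per line), instead of A's forward loop with seven hard-coded if-assignments overwriting an accumulator across all lines.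
import Mathlib
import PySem

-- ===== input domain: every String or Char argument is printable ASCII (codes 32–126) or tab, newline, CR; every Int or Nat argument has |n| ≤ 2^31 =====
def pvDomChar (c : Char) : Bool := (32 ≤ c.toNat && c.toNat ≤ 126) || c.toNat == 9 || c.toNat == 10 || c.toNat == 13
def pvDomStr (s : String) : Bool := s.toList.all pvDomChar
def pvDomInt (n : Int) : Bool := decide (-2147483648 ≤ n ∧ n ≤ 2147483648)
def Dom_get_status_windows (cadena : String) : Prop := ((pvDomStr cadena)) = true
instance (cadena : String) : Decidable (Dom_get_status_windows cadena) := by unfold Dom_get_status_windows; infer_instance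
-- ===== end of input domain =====

-- B scans the lines in reverse with an early return and a keyword table, instead of A's
-- forward overwrite loop; alternative decomposition, same result.


-- ===== PORT A =====
-- the body of A's for-loop: seven independent if-assignments guarded by "STATE"
def pvStepA (result : String) (linea : String) : String :=
  if PySem.Str.isIn "STATE" linea then
    let result := if PySem.Str.isIn "RUNNING" linea then "Servicio activo (El servicio está en ejecución)" else result
    let result := if PySem.Str.isIn "STOPPED" linea then "Servicio inactivo (El servicio no está en ejecución)" else result
    let result := if PySem.Str.isIn "PAUSED" linea then "El servicio está pausado." else result
    let result := if PySem.Str.isIn "START_PENDING" linea then "El servicio está en proceso de inicio" else result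
    let result := if PySem.Str.isIn "STOP_PENDING" linea then "El servicio está en proceso de detención" else result
    let result := if PySem.Str.isIn "CONTINUE_PENDING" linea then "El servicio está en proceso de reanudación después de estar pausado." else result
    let result := if PySem.Str.isIn "PAUSE_PENDING" linea then "El servicio está en proceso de pausa." else result
    result
  else result

def get_status_windows (cadena : String) : String :=
  (PySem.Str.splitlines cadena).foldl pvStepA ""

-- ===== PORT B =====
def pvKeywords : List (String × String) :=
  [("RUNNING", "Servicio activo (El servicio está en ejecución)"),
   ("STOPPED", "Servicio inactivo (El servicio no está en ejecución)"),
   ("PAUSED", "El servicio está pausado."),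
   ("START_PENDING", "El servicio está en proceso de inicio"),
   ("STOP_PENDING", "El servicio está en proceso de detención"),
   ("CONTINUE_PENDING", "El servicio está en proceso de reanudación después de estar pausado."),
   ("PAUSE_PENDING", "El servicio está en proceso de pausa.")]

def pvLineMsg (linea : String) : String :=
  pvKeywords.foldl (fun msg kv => if PySem.Str.isIn kv.1 linea then kv.2 else msg) ""

def pvScan : List String → String
  | [] => ""
  | l :: ls =>
    if PySem.Str.isIn "STATE" l then
      let msg := pvLineMsg l
      if msg ≠ "" then msg else pvScan ls
    else pvScan ls

def get_status_windows_alt (cadena : String) : String :=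
  pvScan (PySem.Str.splitlines cadena).reverse

-- ===== PRECONDITION & SPEC =====
def Spec_get_status_windows (cadena : String) (out : String) : Prop := out = get_status_windows_alt cadena
instance (cadena : String) (out : String) : Decidable (Spec_get_status_windows cadena out) := by unfold Spec_get_status_windows; infer_instance

-- ===== CLAIM (what is proved, stated in full; the proofs are below) =====
def Claim_equal_get_status_windows : Prop := ∀ (cadena : String), Dom_get_status_windows cadena → Spec_get_status_windows cadena (get_status_windows cadena)

-- ===== LEMMAS AND PROOFS =====

-- A's loop body, characterised by B's per-line message
lemma pvStepA_eq (r l : String) :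
    pvStepA r l =
      if PySem.Str.isIn "STATE" l then
        (if pvLineMsg l = "" then r else pvLineMsg l)
      else r := by
  unfold pvStepA pvLineMsg pvKeywords
  simp only [List.foldl]
  split_ifs <;> simp_all

lemma pvScan_append (xs : List String) (l : String) :
    pvScan (xs ++ [l]) = if pvScan xs ≠ "" then pvScan xs else pvScan [l] := by
  induction xs with
  | nil => simp [pvScan]
  | cons x xs ih =>
    simp only [List.cons_append, pvScan]
    split_ifs <;> simp_all [pvScan]

lemma pvFoldl_eq (ls : List String) (r : String) :
    ls.foldl pvStepA r = if pvScan ls.reverse = "" then r else pvScan ls.reverse := by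
  induction ls generalizing r with
  | nil => simp [pvScan]
  | cons l ls ih =>
    simp only [List.foldl, List.reverse_cons, pvScan_append, ih, pvStepA_eq, pvScan]
    split_ifs <;> simp_all

-- ===== VERDICT (by name: the statement is the Claim_ definition above) =====
theorem get_status_windows_spec : Claim_equal_get_status_windows := by
  intro cadena _
  unfold Spec_get_status_windows get_status_windows get_status_windows_alt
  rw [pvFoldl_eq]
  split_ifs with h
  · exact h.symm
  · rfl
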